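-- pv_equiv track=rewrite | github.com/BzhangURU/LeetCode-Python-Solutions | LC00468_Validate_IP_Address.py | is_valid_v4_part
-- ===== SOURCE A (Python) =====
-- def is_valid_v4_part(a_part):
--     if len(a_part)==0 or len(a_part)>3:
--         return False
--     for i in range(len(a_part)):
--         if ord(a_part[i])>ord('9') or ord(a_part[i])<ord('0'):
--             return False
--     if len(a_part)>1 and a_part[0]=='0':
--         return False
--     int_num=int(a_part)
--     if int_num>255:
--         return False
--     return True
-- ===== SOURCE B (Python) =====
-- def is_valid_v4_part(a_part):
--     if not (a_part.isascii() and a_part.isdigit()):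
--         return False
--     n = int(a_part)
--     return n <= 255 and str(n) == a_part
-- ===== Notes on version B (the rewrite author's own statement) =====
-- stated objective: simpler
-- what changed: Replaces A's four explicit branch checks (length 0/>3, per-char ord loop, leading-zero test, >255 test) by a canonicalization round-trip: guard with isascii()+isdigit(), then return int(a_part) <= 255 and str(int(a_part)) == a_part.
import Mathlib
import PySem

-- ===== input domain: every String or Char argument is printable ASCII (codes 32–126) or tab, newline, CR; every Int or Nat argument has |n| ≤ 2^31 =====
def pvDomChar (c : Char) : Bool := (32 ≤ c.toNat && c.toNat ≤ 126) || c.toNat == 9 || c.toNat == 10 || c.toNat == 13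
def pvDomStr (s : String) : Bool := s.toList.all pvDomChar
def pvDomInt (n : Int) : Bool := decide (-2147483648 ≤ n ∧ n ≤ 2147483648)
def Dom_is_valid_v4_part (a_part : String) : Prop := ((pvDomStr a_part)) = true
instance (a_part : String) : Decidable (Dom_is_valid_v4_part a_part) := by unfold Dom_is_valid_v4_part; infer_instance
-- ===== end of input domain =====

-- B replaces A's explicit length / all-digits-loop / leading-zero / >255 branch chain by a
-- canonicalization round-trip: ascii-digit guard, then n = int(s) with n <= 255 and str(n) == s
-- (objective: simpler — fewer branches, no speed claim).

-- ===== PORT A =====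
-- the for-loop over range(len(a_part)) with early 'return False': structural recursion over the chars
def pvA_digits : List Char → Bool
  | [] => true
  | c :: rest => if c.toNat > '9'.toNat ∨ c.toNat < '0'.toNat then false else pvA_digits rest

def pvA_core (cs : List Char) : Bool :=
  if cs.length = 0 ∨ cs.length > 3 then false
  else if pvA_digits cs = false then false
  else if cs.length > 1 ∧ PySem.List.pyGetD cs 0 ' ' = '0' then false
  else if (PySem.Int.ofChars? cs).getD 0 > 255 then false   -- int(a_part); guarded: never raises here
  else true

def is_valid_v4_part (a_part : String) : Bool := pvA_core a_part.toList

-- ===== PORT B =====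
-- a_part.isascii()
def pvB_isascii (cs : List Char) : Bool := cs.all (fun c => decide (c.toNat < 128))

def pvB_core (cs : List Char) : Bool :=
  if ¬ (pvB_isascii cs = true ∧ PySem.Chars.strIsdigit cs = true) then false
  else
    let n := (PySem.Int.ofChars? cs).getD 0                 -- int(a_part); guarded: never raises here
    decide (n ≤ 255) && (PySem.Int.toChars n == cs)         -- n <= 255 and str(n) == a_part

def is_valid_v4_part_alt (a_part : String) : Bool := pvB_core a_part.toList

-- ===== PRECONDITION & SPEC =====
def Spec_is_valid_v4_part (a_part : String) (out : Bool) : Prop := out = is_valid_v4_part_alt a_part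
instance (a_part : String) (out : Bool) : Decidable (Spec_is_valid_v4_part a_part out) := by unfold Spec_is_valid_v4_part; infer_instance

-- ===== CLAIM (what is proved, stated in full; the proofs are below) =====
def Claim_equal_is_valid_v4_part : Prop := ∀ (a_part : String), Dom_is_valid_v4_part a_part → Spec_is_valid_v4_part a_part (is_valid_v4_part a_part)

-- ===== LEMMAS AND PROOFS =====
def DIG : List Char := ['0','1','2','3','4','5','6','7','8','9']

theorem isdigit_iff (c : Char) : PySem.Chars.isdigit c = true ↔ 48 ≤ c.toNat ∧ c.toNat ≤ 57 := by
  simp only [PySem.Chars.isdigit, Bool.and_eq_true, decide_eq_true_eq, Char.le_def,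
    UInt32.le_iff_toNat_le]
  exact Iff.rfl

theorem mem_DIG (c : Char) (h : PySem.Chars.isdigit c = true) : c ∈ DIG := by
  rw [isdigit_iff] at h
  have hofn : Char.ofNat c.toNat = c := Char.ofNat_toNat c
  have h48 : 48 ≤ c.toNat := h.1
  have h57 : c.toNat ≤ 57 := h.2
  rw [← hofn]
  interval_cases (c.toNat) <;> decide

theorem pvA_digits_all (cs : List Char) : pvA_digits cs = cs.all PySem.Chars.isdigit := by
  induction cs with
  | nil => rfl
  | cons c t ih =>
    simp only [pvA_digits, List.all_cons, ih, show '9'.toNat = 57 from rfl,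
      show '0'.toNat = 48 from rfl]
    by_cases h : PySem.Chars.isdigit c = true
    · have := (isdigit_iff c).mp h
      rw [if_neg (by omega), h, Bool.true_and]
    · have hb : PySem.Chars.isdigit c = false := by simpa using h
      have : ¬ (48 ≤ c.toNat ∧ c.toNat ≤ 57) := fun hc => h ((isdigit_iff c).mpr hc)
      rw [if_pos (by omega), hb, Bool.false_and]

set_option maxRecDepth 100000 in
theorem toDigits_len : ∀ m, m < 1000 → (Nat.toDigits 10 m).length ≤ 3 := by decide

set_option maxRecDepth 100000 in
theorem dec1' : (DIG.all fun c => pvA_core [c] == pvB_core [c]) = true := by decide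
set_option maxRecDepth 100000 in
theorem dec2' : (DIG.all fun c => DIG.all fun d => pvA_core [c,d] == pvB_core [c,d]) = true := by decide
set_option maxRecDepth 100000 in
theorem dec3' : (DIG.all fun c => DIG.all fun d => DIG.all fun e => pvA_core [c,d,e] == pvB_core [c,d,e]) = true := by decide

theorem dec1 : ∀ c ∈ DIG, pvA_core [c] = pvB_core [c] := by
  have := dec1'; simp only [List.all_eq_true, beq_iff_eq] at this; exact this
theorem dec2 : ∀ c ∈ DIG, ∀ d ∈ DIG, pvA_core [c,d] = pvB_core [c,d] := by
  have := dec2'; simpa only [List.all_eq_true, beq_iff_eq] using this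
theorem dec3 : ∀ c ∈ DIG, ∀ d ∈ DIG, ∀ e ∈ DIG, pvA_core [c,d,e] = pvB_core [c,d,e] := by
  have := dec3'; simpa only [List.all_eq_true, beq_iff_eq] using this

-- for an all-digit string of length ≥ 4, B's conjunction is false whatever int() returned
theorem pvB_long_false (cs : List Char) (hall : cs.all PySem.Chars.isdigit = true)
    (hlen : 4 ≤ cs.length) (n : Int) :
    (decide (n ≤ 255) && (PySem.Int.toChars n == cs)) = false := by
  by_cases hn : n ≤ 255
  · suffices h : PySem.Int.toChars n ≠ cs by
      simp [beq_eq_false_iff_ne.mpr h]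
    intro he
    by_cases hneg : n < 0
    · -- toChars n starts with '-', but every char of cs is a digit
      rw [PySem.Int.toChars, if_pos hneg] at he
      have hm : '-' ∈ cs := he ▸ List.mem_cons_self
      have := (List.all_eq_true.mp hall) '-' hm
      exact absurd this (by decide)
    · rw [not_lt] at hneg
      rw [PySem.Int.toChars, if_neg (by omega)] at he
      have hlt : n.toNat < 1000 := by omega
      have h3 := toDigits_len n.toNat hlt
      have := congrArg List.length he
      omega
  · simp [hn]

theorem core_eq (cs : List Char) : pvA_core cs = pvB_core cs := by
  by_cases hd : PySem.Chars.strIsdigit cs = true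
  · have hall : cs.all PySem.Chars.isdigit = true := by
      simp only [PySem.Chars.strIsdigit, Bool.and_eq_true] at hd; exact hd.2
    have hne : cs ≠ [] := by
      simp only [PySem.Chars.strIsdigit, Bool.and_eq_true, Bool.not_eq_eq_eq_not,
        Bool.not_true] at hd
      exact fun h => by simp [h] at hd
    have hascii : pvB_isascii cs = true := by
      simp only [pvB_isascii, List.all_eq_true, decide_eq_true_eq]
      intro c hc
      have := (isdigit_iff c).mp ((List.all_eq_true.mp hall) c hc)
      omega
    match cs, hne with
    | [a], _ =>
      have ha := mem_DIG a ((List.all_eq_true.mp hall) a (by simp))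
      exact dec1 a ha
    | [a,b], _ =>
      have ha := mem_DIG a ((List.all_eq_true.mp hall) a (by simp))
      have hb := mem_DIG b ((List.all_eq_true.mp hall) b (by simp))
      exact dec2 a ha b hb
    | [a,b,c], _ =>
      have ha := mem_DIG a ((List.all_eq_true.mp hall) a (by simp))
      have hb := mem_DIG b ((List.all_eq_true.mp hall) b (by simp))
      have hc := mem_DIG c ((List.all_eq_true.mp hall) c (by simp))
      exact dec3 a ha b hb c hc
    | a :: b :: c :: d :: t, _ =>
      have hlen : 4 ≤ (a :: b :: c :: d :: t).length := by simp
      have hA : pvA_core (a :: b :: c :: d :: t) = false := by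
        rw [pvA_core, if_pos (by right; simp)]
      have hB : pvB_core (a :: b :: c :: d :: t) = false := by
        rw [pvB_core, if_neg (not_not_intro ⟨hascii, hd⟩)]
        exact pvB_long_false _ hall hlen _
      rw [hA, hB]
  · have hB : pvB_core cs = false := by
      rw [pvB_core, if_pos (fun h => hd h.2)]
    rw [hB]
    cases cs with
    | nil => rfl
    | cons c t =>
      have hallf : (c :: t).all PySem.Chars.isdigit = false := by
        simp only [PySem.Chars.strIsdigit] at hd
        cases h : (c :: t).all PySem.Chars.isdigit with
        | false => rfl
        | true => exact absurd (by simp [h]) hd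
      have hdig : pvA_digits (c :: t) = false := by rw [pvA_digits_all, hallf]
      simp [pvA_core, hdig]

-- ===== VERDICT (by name: the statement is the Claim_ definition above) =====
theorem is_valid_v4_part_spec : Claim_equal_is_valid_v4_part := by
  intro a_part _
  unfold Spec_is_valid_v4_part is_valid_v4_part is_valid_v4_part_alt
  exact core_eq a_part.toList
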